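-- pv_equiv track=rewrite | github.com/zubair-ce07/testtt | outdoorvoices_spider.py | filter_sku
-- ===== SOURCE A (Python) =====
-- def filter_sku(skus):
--     colours = list(set([sku['colour'] for key, sku in skus.items()]))
--     colour_count = {colour: 0 for colour in colours}
--     out_of_stock_count = colour_count.copy()
--     for key, sku in skus.items():
--         out_of_stock_count[sku['colour']] += 1 if 'out_of_stock' in sku else 0
--         colour_count[sku['colour']] += 1
--     sku_to_del = []
--     for sku_id, sku in skus.items():
--         if out_of_stock_count[sku['colour']] == colour_count[sku['colour']]:
--             sku_to_del.append(sku_id)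
--     for sku_id in sku_to_del:
--         del skus[sku_id]
--     return skus
-- ===== SOURCE B (Python) =====
-- def filter_sku(skus):
--     # One pass: a colour survives iff at least one of its skus is in stock.
--     in_stock_colours = {sku['colour'] for sku in skus.values() if 'out_of_stock' not in sku}
--     sku_to_del = [sku_id for sku_id, sku in skus.items()
--                   if sku['colour'] not in in_stock_colours]
--     for sku_id in sku_to_del:
--         del skus[sku_id]
--     return skus
-- ===== Notes on version B (the rewrite author's own statement) =====
-- stated objective: simpler
-- what changed: Replaces the two per-colour count dicts and the count-equality test with a single set of in-stock colours built in one pass; a sku is deleted iff its colour is absent from that set.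
import Mathlib
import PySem

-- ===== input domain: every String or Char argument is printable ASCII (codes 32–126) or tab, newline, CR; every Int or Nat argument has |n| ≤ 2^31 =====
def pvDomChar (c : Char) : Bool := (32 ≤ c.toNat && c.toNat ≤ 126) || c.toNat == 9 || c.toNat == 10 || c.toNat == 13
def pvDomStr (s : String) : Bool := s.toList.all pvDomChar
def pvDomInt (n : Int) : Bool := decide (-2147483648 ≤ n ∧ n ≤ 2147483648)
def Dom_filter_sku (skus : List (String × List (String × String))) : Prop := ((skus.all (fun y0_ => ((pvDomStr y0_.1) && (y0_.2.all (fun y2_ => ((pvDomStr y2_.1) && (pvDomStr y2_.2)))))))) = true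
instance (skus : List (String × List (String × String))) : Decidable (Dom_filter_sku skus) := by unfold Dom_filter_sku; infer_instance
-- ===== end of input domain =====

-- B replaces A's two per-colour count dicts (and their equality test) by one set of
-- in-stock colours: a sku is deleted iff its colour has no in-stock sku (objective: simpler).
-- Both A and B mutate the dict in place and return the same object; the theorems below are
-- about the returned value (the in-place deletions performed are the same in both).

-- sku['colour'] (total form; under Pre_ the key is present, where Python A would raise KeyError)
def pvColour (sku : List (String × String)) : String :=
  ((PySem.Dict.mk sku).get? "colour").getD ""

-- 'out_of_stock' in sku
def pvOOS (sku : List (String × String)) : Bool :=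
  (PySem.Dict.mk sku).contains "out_of_stock"

-- for sku_id in sku_to_del: del skus[sku_id]
def pvDelAll (skus : List (String × List (String × String))) (toDel : List String) :
    List (String × List (String × String)) :=
  toDel.foldl (fun acc sid => (PySem.Dict.erase (PySem.Dict.mk acc) sid).items) skus

-- ===== PORT A =====
def filter_sku (skus : List (String × List (String × String))) : List (String × List (String × String)) :=
  -- colours = list(set([sku['colour'] for key, sku in skus.items()]))
  let colours : PySem.Set String := PySem.Set.ofList (skus.map (fun kv => pvColour kv.2))
  -- colour_count = {colour: 0 for colour in colours}; out_of_stock_count = colour_count.copy()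
  let colour_count0 : PySem.Dict String Int := PySem.Dict.mk (colours.map (fun c => (c, (0 : Int))))
  let out_of_stock_count0 : PySem.Dict String Int := colour_count0
  -- for key, sku in skus.items(): out_of_stock_count[...] += …; colour_count[...] += 1
  -- (the key is always present, so 'modify … 0' performs exactly Python's 'd[k] += …')
  let counts :=
    skus.foldl
      (fun (p : PySem.Dict String Int × PySem.Dict String Int) kv =>
        (p.1.modify (pvColour kv.2) 0 (· + (if pvOOS kv.2 then (1 : Int) else 0)),
         p.2.modify (pvColour kv.2) 0 (· + 1)))
      (out_of_stock_count0, colour_count0)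
  let out_of_stock_count := counts.1
  let colour_count := counts.2
  -- sku_to_del loop
  let sku_to_del : List String :=
    skus.foldl
      (fun acc kv =>
        if out_of_stock_count.getD (pvColour kv.2) 0 == colour_count.getD (pvColour kv.2) 0
        then acc ++ [kv.1] else acc) []
  pvDelAll skus sku_to_del

-- ===== PORT B =====
def filter_sku_alt (skus : List (String × List (String × String))) : List (String × List (String × String)) :=
  -- in_stock_colours = {sku['colour'] for sku in skus.values() if 'out_of_stock' not in sku}
  let in_stock_colours : PySem.Set String :=
    PySem.Set.ofList ((skus.filter (fun kv => !pvOOS kv.2)).map (fun kv => pvColour kv.2))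
  -- sku_to_del = [sku_id for sku_id, sku in skus.items() if sku['colour'] not in in_stock_colours]
  let sku_to_del : List String :=
    (skus.filter (fun kv => !in_stock_colours.contains (pvColour kv.2))).map (fun kv => kv.1)
  pvDelAll skus sku_to_del

-- ===== PRECONDITION & SPEC =====
-- Pre_ excludes (a) skus lacking a 'colour' key, on which Python A raises KeyError, and
-- (b) association lists with duplicate keys (outer or inner), which cannot occur as a Python dict.
def Pre_filter_sku (skus : List (String × List (String × String))) : Prop :=
  ((skus.map (fun kv => kv.1)).Nodup ∧
   ∀ kv ∈ skus, (kv.2.map (fun p => p.1)).Nodup ∧ (PySem.Dict.mk kv.2).contains "colour" = true)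
instance (skus : List (String × List (String × String))) : Decidable (Pre_filter_sku skus) := by unfold Pre_filter_sku; infer_instance

def pvWitness_filter_sku : (List (String × List (String × String))) :=
  [("s1", [("colour", "red"), ("out_of_stock", "1")]), ("s2", [("colour", "red")]),
   ("s3", [("colour", "blue"), ("out_of_stock", "1")])]

def Spec_filter_sku (skus : List (String × List (String × String))) (out : List (String × List (String × String))) : Prop := out = filter_sku_alt skus
instance (skus : List (String × List (String × String))) (out : List (String × List (String × String))) : Decidable (Spec_filter_sku skus out) := by unfold Spec_filter_sku; infer_instance

-- ===== CLAIM (what is proved, stated in full; the proofs are below) =====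
def Claim_equal_filter_sku : Prop := ∀ (skus : List (String × List (String × String))), Dom_filter_sku skus → Pre_filter_sku skus → Spec_filter_sku skus (filter_sku skus)

-- ===== LEMMAS AND PROOFS =====

-- the zero-initialised dict reads 0 at every key
theorem getD_mk_zeros (l : List String) (v : String) :
    (PySem.Dict.mk (l.map (fun c => (c, (0 : Int))))).getD v 0 = 0 := by
  induction l with
  | nil => rfl
  | cons c l ih =>
    simp only [List.map_cons, PySem.Dict.getD, PySem.Dict.get?, List.find?]
    by_cases h : c == v
    · simp [h]
    · simpa [h, PySem.Dict.getD, PySem.Dict.get?] using ih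

-- a counting loop 'd[key(x)] += g(x)' read back at v is the sum of g over the x with key(x) = v
theorem getD_foldl_modify_add (l : List (String × List (String × String)))
    (key : String × List (String × String) → String)
    (g : String × List (String × String) → Int) (d : PySem.Dict String Int) (v : String) :
    (l.foldl (fun d kv => d.modify (key kv) 0 (· + g kv)) d).getD v 0
      = d.getD v 0 + ((l.filter (fun kv => key kv == v)).map g).sum := by
  induction l generalizing d with
  | nil => simp
  | cons kv l ih =>
    simp only [List.foldl_cons, ih, List.filter_cons]
    by_cases h : key kv = v
    · simp [h]; ring
    · simp [h, PySem.Dict.getD_modify, Ne.symm h]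

theorem counts_eq (skus : List (String × List (String × String))) :
    ((skus.foldl
        (fun (p : PySem.Dict String Int × PySem.Dict String Int) kv =>
          (p.1.modify (pvColour kv.2) 0 (· + (if pvOOS kv.2 then (1 : Int) else 0)),
           p.2.modify (pvColour kv.2) 0 (· + 1)))
        (PySem.Dict.mk (((PySem.Set.ofList (skus.map (fun kv => pvColour kv.2))) : List String).map (fun c => (c, (0 : Int)))),
         PySem.Dict.mk (((PySem.Set.ofList (skus.map (fun kv => pvColour kv.2))) : List String).map (fun c => (c, (0 : Int)))))))
      = (skus.foldl (fun d kv => d.modify (pvColour kv.2) 0 (· + (if pvOOS kv.2 then (1 : Int) else 0)))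
          (PySem.Dict.mk (((PySem.Set.ofList (skus.map (fun kv => pvColour kv.2))) : List String).map (fun c => (c, (0 : Int))))),
         skus.foldl (fun d kv => d.modify (pvColour kv.2) 0 (· + 1))
          (PySem.Dict.mk (((PySem.Set.ofList (skus.map (fun kv => pvColour kv.2))) : List String).map (fun c => (c, (0 : Int)))))) := by
  exact PySem.List.foldl_prod_mk
    (f := fun (d : PySem.Dict String Int) kv => PySem.Dict.modify d (pvColour kv.2) 0 (· + (if pvOOS kv.2 then (1 : Int) else 0)))
    (g := fun (d : PySem.Dict String Int) kv => PySem.Dict.modify d (pvColour kv.2) 0 (· + 1)) skus _ _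

-- the per-sku decision of A equals the per-sku decision of B (for every sku record, every input)
theorem decision_eq (skus : List (String × List (String × String)))
    (kv : String × List (String × String)) :
    ((skus.foldl (fun d kv => d.modify (pvColour kv.2) 0 (· + (if pvOOS kv.2 then (1 : Int) else 0)))
        (PySem.Dict.mk (((PySem.Set.ofList (skus.map (fun kv => pvColour kv.2))) : List String).map (fun c => (c, (0 : Int)))))).getD (pvColour kv.2) 0
      = (skus.foldl (fun d kv => d.modify (pvColour kv.2) 0 (· + 1))
        (PySem.Dict.mk (((PySem.Set.ofList (skus.map (fun kv => pvColour kv.2))) : List String).map (fun c => (c, (0 : Int)))))).getD (pvColour kv.2) 0)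
    ↔ (!(PySem.Set.ofList ((skus.filter (fun kv => !pvOOS kv.2)).map (fun kv => pvColour kv.2))).contains (pvColour kv.2)) = true := by
  rw [getD_foldl_modify_add, getD_foldl_modify_add, getD_mk_zeros]
  set v := pvColour kv.2 with hv
  set fl := skus.filter (fun kv => pvColour kv.2 == v) with hfl
  have h1 : ((fl.map (fun kv => if pvOOS kv.2 then (1 : Int) else 0)).sum)
      = (fl.countP (fun kv => pvOOS kv.2) : Int) := PySem.List.sum_map_ite_one_zero _ _
  have h2 : ((fl.map (fun _ => (1 : Int))).sum) = (fl.length : Int) := by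
    simp
  rw [h1, h2]
  simp only [zero_add]
  have hcnt : ((fl.countP (fun kv => pvOOS kv.2) : Int) = (fl.length : Int))
      ↔ ∀ y ∈ fl, pvOOS y.2 = true := by
    constructor
    · intro h; exact List.countP_eq_length.mp (by exact_mod_cast h)
    · intro h; exact_mod_cast List.countP_eq_length.mpr h
  have hcon : (PySem.Set.ofList ((skus.filter (fun kv => !pvOOS kv.2)).map (fun kv => pvColour kv.2))).contains v = true
      ↔ ∃ y ∈ skus, pvOOS y.2 = false ∧ pvColour y.2 = v := by
    rw [PySem.Set.contains_iff, PySem.Set.mem_ofList]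
    simp only [List.mem_map, List.mem_filter, Bool.not_eq_eq_eq_not, Bool.not_true]
    constructor
    · rintro ⟨y, ⟨hy, hno⟩, hyv⟩; exact ⟨y, hy, hno, hyv⟩
    · rintro ⟨y, hy, hno, hyv⟩; exact ⟨y, ⟨hy, hno⟩, hyv⟩
  rw [hcnt, Bool.not_eq_true', Bool.eq_false_iff, Ne, hcon]
  constructor
  · rintro hall ⟨y, hy, hno, hyv⟩
    have : y ∈ fl := by rw [hfl]; exact List.mem_filter.mpr ⟨hy, by simp [hyv]⟩
    rw [hall y this] at hno; cases hno
  · intro hnone y hyfl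
    by_contra hny
    rw [hfl] at hyfl
    obtain ⟨hy, hyv⟩ := List.mem_filter.mp hyfl
    exact hnone ⟨y, hy, by simpa using hny, by simpa using hyv⟩

-- ===== VERDICT (by name: the statement is the Claim_ definition above) =====
theorem filter_sku_spec : Claim_equal_filter_sku := by
  intro skus _ _
  show filter_sku skus = filter_sku_alt skus
  simp only [filter_sku, filter_sku_alt]
  rw [counts_eq]
  rw [PySem.List.foldl_append_if]
  simp only [List.nil_append]
  refine congrArg (pvDelAll skus) ?_
  refine congrArg (List.map _) ?_
  apply List.filter_congr
  intro kv _
  rw [Bool.eq_iff_iff]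
  simp only [beq_iff_eq]
  exact decision_eq skus kv
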